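-- pv_equiv track=rewrite | github.com/gaborhor/algorithms | chain_matrix_mult_DP.py | parentStr
-- ===== SOURCE A (Python) =====
-- def parentStr(traceback, low=0, high=None): # DAC process is standard by now, no comment
--     if high == None:
--         high = len(traceback) - 1
--     if low == high:
--         return f"A{low}"
--
--     split = traceback[low][high]
--
--     left_best = parentStr(traceback, low, split)
--     right_best = parentStr(traceback, split+1, high)
--
--     return "(" + left_best + ")(" + right_best + ")"
-- ===== SOURCE B (Python) =====
-- def parentStr(traceback, low=0, high=None):
--     # Iterative two-phase (expand/combine) explicit-stack traversal instead of native recursion.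
--     if high is None:
--         high = len(traceback) - 1
--     tasks = [("interval", low, high)]
--     results = []
--     while tasks:
--         task = tasks.pop()
--         if task[0] == "interval":
--             _, lo, hi = task
--             if lo == hi:
--                 results.append(f"A{lo}")
--             else:
--                 split = traceback[lo][hi]
--                 tasks.append(("combine",))
--                 tasks.append(("interval", split + 1, hi))
--                 tasks.append(("interval", lo, split))
--         else:
--             right = results.pop()
--             left = results.pop()
--             results.append("(" + left + ")(" + right + ")")
--     return results[-1]
-- ===== Notes on version B (the rewrite author's own statement) =====
-- stated objective: alternative
-- what changed: Replaces A's native divide-and-conquer recursion by an iterative two-phase (expand/combine) explicit task stack with a results stack; Pre_ admits any trivial low=high call and otherwise requires a square traceback with valid splits (the shape a chain-matrix DP traceback has), so it excludes a few ragged-but-accidentally-indexable tracebacks on which A still returns.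
-- outside the precondition, e.g. on parentStr([[0, 0], [0]], 0, 1): A returns '(A0)(A1)', B returns '(A0)(A1)'
import Mathlib
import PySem

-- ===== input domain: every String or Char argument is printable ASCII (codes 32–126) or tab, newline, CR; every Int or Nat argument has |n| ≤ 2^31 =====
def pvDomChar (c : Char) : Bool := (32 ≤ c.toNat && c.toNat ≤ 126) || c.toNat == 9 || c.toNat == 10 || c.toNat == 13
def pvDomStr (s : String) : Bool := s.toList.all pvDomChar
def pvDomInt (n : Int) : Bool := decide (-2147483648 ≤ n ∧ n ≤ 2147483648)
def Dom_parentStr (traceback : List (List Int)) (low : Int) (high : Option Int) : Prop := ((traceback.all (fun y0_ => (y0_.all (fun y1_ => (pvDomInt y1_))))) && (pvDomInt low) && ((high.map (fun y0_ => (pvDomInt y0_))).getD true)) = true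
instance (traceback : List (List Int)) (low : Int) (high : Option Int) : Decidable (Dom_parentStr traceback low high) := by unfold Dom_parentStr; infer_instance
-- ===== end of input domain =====

-- B replaces A's native recursion by an iterative two-phase explicit-stack traversal (same output; objective: alternative decomposition).

-- ===== PORT A =====
-- traceback[low][high]; the `.getD 0` default is only reached where Python raises IndexError (outside Pre_)
def pvSplit (traceback : List (List Int)) (lo hi : Int) : Int :=
  ((PySem.List.pyGet? traceback lo).bind (fun row => PySem.List.pyGet? row hi)).getD 0

-- fuel is only a totality guard for Lean: under Pre_ the recursion depth is < (high-low).toNat + 1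
def parentStrGo (traceback : List (List Int)) (low high : Int) : Nat → String
  | 0 => ""
  | f + 1 =>
    if low = high then "A" ++ PySem.Int.toStr low
    else
      let split := pvSplit traceback low high
      let left_best := parentStrGo traceback low split f
      let right_best := parentStrGo traceback (split + 1) high f
      "(" ++ left_best ++ ")(" ++ right_best ++ ")"

def parentStr (traceback : List (List Int)) (low : Int) (high : Option Int) : String :=
  let h : Int := match high with | none => (traceback.length : Int) - 1 | some x => x
  parentStrGo traceback low h ((h - low).toNat + 1)

-- ===== PORT B =====
inductive PvTask where
  | interval : Int → Int → PvTask
  | combine : PvTask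
deriving DecidableEq, Repr

-- the while loop of Source B; fuel is only a totality guard (none = loop not finished), never hit under Pre_
def parentStrRun (traceback : List (List Int)) : List PvTask → List String → Nat → Option String
  | [], results, _ => results.head?          -- while loop done; results[-1] (head = most recent push)
  | _ :: _, _, 0 => none
  | PvTask.interval lo hi :: tasks, results, f + 1 =>
    if lo = hi then
      parentStrRun traceback tasks (("A" ++ PySem.Int.toStr lo) :: results) f
    else
      let split := pvSplit traceback lo hi
      parentStrRun traceback
        (PvTask.interval lo split :: PvTask.interval (split + 1) hi :: PvTask.combine :: tasks)
        results f
  | PvTask.combine :: tasks, results, f + 1 =>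
    match results with
    | right :: left :: rest =>
        parentStrRun traceback tasks (("(" ++ left ++ ")(" ++ right ++ ")") :: rest) f
    | _ => none                              -- results.pop() on short stack: unreachable

def parentStr_alt (traceback : List (List Int)) (low : Int) (high : Option Int) : String :=
  let h : Int := match high with | none => (traceback.length : Int) - 1 | some x => x
  (parentStrRun traceback [PvTask.interval low h] [] (3 ^ ((h - low).toNat + 1))).getD ""

-- ===== PRECONDITION & SPEC =====
-- Pre_ excludes inputs where A raises (IndexError) or recurses forever; it admits every trivial
-- low = high call and otherwise requires a square traceback whose entries in the queried triangle
-- are valid splits (i ≤ traceback[i][j] < j) — the shape a chain-matrix DP traceback always has.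
def Pre_parentStr (traceback : List (List Int)) (low : Int) (high : Option Int) : Prop :=
  low = high.getD ((traceback.length : Int) - 1) ∨
    (0 ≤ low ∧ low < high.getD ((traceback.length : Int) - 1) ∧
      high.getD ((traceback.length : Int) - 1) < (traceback.length : Int) ∧
      (∀ row ∈ traceback, row.length = traceback.length) ∧
      ∀ a < traceback.length, ∀ b < traceback.length,
        (low ≤ (a : Int) ∧ (a : Int) < (b : Int) ∧ (b : Int) ≤ high.getD ((traceback.length : Int) - 1)) →
        ((a : Int) ≤ (traceback[a]!)[b]! ∧ (traceback[a]!)[b]! < (b : Int)))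
instance (traceback : List (List Int)) (low : Int) (high : Option Int) : Decidable (Pre_parentStr traceback low high) := by unfold Pre_parentStr; infer_instance

def pvWitness_parentStr : List (List Int) × Int × Option Int := ([[0, 0, 1], [0, 0, 1], [0, 0, 0]], 0, none)

def Spec_parentStr (traceback : List (List Int)) (low : Int) (high : Option Int) (out : String) : Prop := out = parentStr_alt traceback low high
instance (traceback : List (List Int)) (low : Int) (high : Option Int) (out : String) : Decidable (Spec_parentStr traceback low high out) := by unfold Spec_parentStr; infer_instance

-- ===== CLAIM (what is proved, stated in full; the proofs are below) =====
def Claim_equal_parentStr : Prop := ∀ (traceback : List (List Int)) (low : Int) (high : Option Int), Dom_parentStr traceback low high → Pre_parentStr traceback low high → Spec_parentStr traceback low high (parentStr traceback low high)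

-- ===== LEMMAS AND PROOFS =====

-- split validity on every subinterval of [lo, hi]
def PvValid (traceback : List (List Int)) (lo hi : Int) : Prop :=
  ∀ i j : Int, lo ≤ i → i < j → j ≤ hi → i ≤ pvSplit traceback i j ∧ pvSplit traceback i j < j

theorem pvValid_mono {traceback : List (List Int)} {lo hi lo' hi' : Int}
    (h : PvValid traceback lo hi) (h1 : lo ≤ lo') (h2 : hi' ≤ hi) : PvValid traceback lo' hi' :=
  fun i j hi_ hij hj => h i j (le_trans h1 hi_) hij (le_trans hj h2)

-- A's recursion is fuel-irrelevant once the fuel exceeds the interval length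
theorem parentStrGo_fuel (traceback : List (List Int)) :
    ∀ d lo hi, lo ≤ hi → PvValid traceback lo hi → (hi - lo).toNat ≤ d →
      ∀ f g, d < f → d < g → parentStrGo traceback lo hi f = parentStrGo traceback lo hi g := by
  intro d
  induction d with
  | zero =>
    intro lo hi hle _ hd f g hf hg
    have : lo = hi := by omega
    obtain ⟨f', rfl⟩ := Nat.exists_eq_succ_of_ne_zero (by omega : f ≠ 0)
    obtain ⟨g', rfl⟩ := Nat.exists_eq_succ_of_ne_zero (by omega : g ≠ 0)
    simp [parentStrGo, this]
  | succ d ih =>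
    intro lo hi hle hv hd f g hf hg
    obtain ⟨f', rfl⟩ := Nat.exists_eq_succ_of_ne_zero (by omega : f ≠ 0)
    obtain ⟨g', rfl⟩ := Nat.exists_eq_succ_of_ne_zero (by omega : g ≠ 0)
    by_cases hlh : lo = hi
    · simp [parentStrGo, hlh]
    · have hlt : lo < hi := lt_of_le_of_ne hle hlh
      obtain ⟨hs1, hs2⟩ := hv lo hi le_rfl hlt le_rfl
      have hL := ih lo (pvSplit traceback lo hi) hs1
        (pvValid_mono hv le_rfl (by omega)) (by omega) f' g' (by omega) (by omega)
      have hR := ih (pvSplit traceback lo hi + 1) hi (by omega)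
        (pvValid_mono hv (by omega) le_rfl) (by omega) f' g' (by omega) (by omega)
      simp only [parentStrGo, if_neg hlh]
      rw [hL, hR]

theorem parentStrGo_succ (traceback : List (List Int)) (lo hi : Int) (f : Nat) (h : lo ≠ hi) :
    parentStrGo traceback lo hi (f + 1) =
      "(" ++ parentStrGo traceback lo (pvSplit traceback lo hi) f ++ ")(" ++
        parentStrGo traceback (pvSplit traceback lo hi + 1) hi f ++ ")" := by
  simp only [parentStrGo, if_neg h]

-- canonical value of A's recursion
def pvC (traceback : List (List Int)) (lo hi : Int) : String :=
  parentStrGo traceback lo hi ((hi - lo).toNat + 1)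

-- the stack machine ignores extra fuel once it has enough
theorem parentStrRun_mono (traceback : List (List Int)) :
    ∀ f ts rs v k, parentStrRun traceback ts rs f = some v →
      parentStrRun traceback ts rs (f + k) = some v := by
  intro f
  induction f with
  | zero =>
    intro ts rs v k h
    cases ts with
    | nil => simpa [parentStrRun] using h
    | cons t ts' => simp [parentStrRun] at h
  | succ f ih =>
    intro ts rs v k h
    cases ts with
    | nil => simpa [parentStrRun] using h
    | cons t ts' =>
      have hk : f + 1 + k = (f + k) + 1 := by omega
      rw [hk]
      cases t with
      | interval lo hi =>
        by_cases hlh : lo = hi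
        · simp only [parentStrRun, if_pos hlh] at h ⊢
          exact ih _ _ _ k h
        · simp only [parentStrRun, if_neg hlh] at h ⊢
          exact ih _ _ _ k h
      | combine =>
        cases rs with
        | nil => simp [parentStrRun] at h
        | cons r rs' =>
          cases rs' with
          | nil => simp [parentStrRun] at h
          | cons l rest =>
            simp only [parentStrRun] at h ⊢
            exact ih _ _ _ k h

-- main invariant: processing one interval pushes its canonical string
theorem parentStrRun_interval (traceback : List (List Int)) :
    ∀ d lo hi, lo ≤ hi → PvValid traceback lo hi → (hi - lo).toNat ≤ d →
      ∀ ts rs f v, parentStrRun traceback ts (pvC traceback lo hi :: rs) f = some v →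
        parentStrRun traceback (PvTask.interval lo hi :: ts) rs (f + 3 ^ (d + 1)) = some v := by
  intro d
  induction d with
  | zero =>
    intro lo hi hle _ hd ts rs f v h
    have heq : lo = hi := by omega
    have h3 : f + 3 ^ 1 = (f + 2) + 1 := by omega
    rw [h3]
    simp only [parentStrRun, if_pos heq]
    have hc : pvC traceback lo hi = "A" ++ PySem.Int.toStr lo := by
      simp [pvC, heq, parentStrGo]
    rw [← hc]
    exact parentStrRun_mono traceback f ts _ v 2 h
  | succ d ih =>
    intro lo hi hle hv hd ts rs f v h
    by_cases hlh : lo = hi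
    · -- same as the base case
      have h3 : f + 3 ^ (d + 2) = (f + (3 ^ (d + 2) - 1)) + 1 := by
        have : 1 ≤ 3 ^ (d + 2) := Nat.one_le_pow _ _ (by omega)
        omega
      rw [h3]
      simp only [parentStrRun, if_pos hlh]
      have hc : pvC traceback lo hi = "A" ++ PySem.Int.toStr lo := by
        simp [pvC, hlh, parentStrGo]
      rw [← hc]
      exact parentStrRun_mono traceback f ts _ v _ h
    · have hlt : lo < hi := lt_of_le_of_ne hle hlh
      set s := pvSplit traceback lo hi with hs
      obtain ⟨hs1, hs2⟩ := hv lo hi le_rfl hlt le_rfl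
      -- canonical value decomposes
      have hCL : parentStrGo traceback lo s ((hi - lo).toNat) = pvC traceback lo s := by
        exact parentStrGo_fuel traceback (s - lo).toNat lo s hs1
          (pvValid_mono hv le_rfl (by omega)) le_rfl _ _ (by omega) (by omega)
      have hCR : parentStrGo traceback (s + 1) hi ((hi - lo).toNat) = pvC traceback (s + 1) hi := by
        exact parentStrGo_fuel traceback (hi - (s + 1)).toNat (s + 1) hi (by omega)
          (pvValid_mono hv (by omega) le_rfl) le_rfl _ _ (by omega) (by omega)
      have hdec : pvC traceback lo hi =
          "(" ++ pvC traceback lo s ++ ")(" ++ pvC traceback (s + 1) hi ++ ")" := by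
        unfold pvC
        rw [parentStrGo_succ traceback lo hi ((hi - lo).toNat) hlh, ← hs, hCL, hCR]
        rfl
      -- combine step
      have h1 : parentStrRun traceback (PvTask.combine :: ts)
          (pvC traceback (s + 1) hi :: pvC traceback lo s :: rs) (f + 1) = some v := by
        simp only [parentStrRun]
        rw [← hdec]; exact h
      -- right interval
      have h2 := ih (s + 1) hi (by omega) (pvValid_mono hv (by omega) le_rfl) (by omega)
        (PvTask.combine :: ts) (pvC traceback lo s :: rs) (f + 1) v h1
      -- left interval
      have h3 := ih lo s hs1 (pvValid_mono hv le_rfl (by omega)) (by omega)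
        (PvTask.interval (s + 1) hi :: PvTask.combine :: ts) rs (f + 1 + 3 ^ (d + 1)) v h2
      -- expand step
      have h4 : parentStrRun traceback (PvTask.interval lo hi :: ts) rs
          ((f + 1 + 3 ^ (d + 1) + 3 ^ (d + 1)) + 1) = some v := by
        simp only [parentStrRun, if_neg hlh, ← hs]
        exact h3
      have hfin : f + 3 ^ (d + 2) =
          ((f + 1 + 3 ^ (d + 1) + 3 ^ (d + 1)) + 1) + (3 ^ (d + 2) - 2 * 3 ^ (d + 1) - 2) := by
        have hp : 3 ^ (d + 2) = 3 * 3 ^ (d + 1) := by ring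
        have : 1 ≤ 3 ^ (d + 1) := Nat.one_le_pow _ _ (by omega)
        omega
      rw [hfin]
      exact parentStrRun_mono traceback _ _ _ _ _ h4

-- Pre_ (non-trivial branch) gives split validity on the whole queried triangle
theorem pre_valid (traceback : List (List Int)) (low h : Int)
    (h0 : 0 ≤ low) (hh : h < (traceback.length : Int))
    (hsq : ∀ row ∈ traceback, row.length = traceback.length)
    (hval : ∀ a < traceback.length, ∀ b < traceback.length,
      (low ≤ (a : Int) ∧ (a : Int) < (b : Int) ∧ (b : Int) ≤ h) →
      ((a : Int) ≤ (traceback[a]!)[b]! ∧ (traceback[a]!)[b]! < (b : Int))) :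
    PvValid traceback low h := by
  intro i j hli hij hjh
  have hi0 : 0 ≤ i := le_trans h0 hli
  have hj0 : 0 ≤ j := by omega
  have hin : i < (traceback.length : Int) := by omega
  have hjn : j < (traceback.length : Int) := by omega
  set a := i.toNat with ha
  set b := j.toNat with hb
  have hia : (a : Int) = i := Int.toNat_of_nonneg hi0
  have hjb : (b : Int) = j := Int.toNat_of_nonneg hj0
  have han : a < traceback.length := by omega
  have hrow : traceback[a]!.length = traceback.length := by
    have hmem : traceback[a]! ∈ traceback := by
      rw [getElem!_pos traceback a han]
      exact List.getElem_mem han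
    exact hsq _ hmem
  have hbn : b < traceback[a]!.length := by omega
  have e1 : PySem.List.pyGet? traceback i = some traceback[a]! := by
    rw [getElem!_pos traceback a han]
    exact PySem.List.pyGet?_eq_some_getElem traceback hi0 hin
  have hjrow : j < (traceback[a]!.length : Int) := by rw [hrow]; exact hjn
  have e2 : PySem.List.pyGet? traceback[a]! j = some (traceback[a]!)[b]! := by
    rw [getElem!_pos (traceback[a]!) b hbn]
    exact PySem.List.pyGet?_eq_some_getElem _ hj0 hjrow
  have hsp : pvSplit traceback i j = (traceback[a]!)[b]! := by
    unfold pvSplit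
    rw [e1]
    simp only [Option.bind]
    rw [e2, Option.getD_some]
  obtain ⟨h1, h2⟩ := hval a han b (by omega) ⟨by omega, by omega, by omega⟩
  rw [hsp]; omega

theorem pvMain (traceback : List (List Int)) (low h : Int)
    (hpre : low = h ∨
      (0 ≤ low ∧ low < h ∧ h < (traceback.length : Int) ∧
        (∀ row ∈ traceback, row.length = traceback.length) ∧
        ∀ a < traceback.length, ∀ b < traceback.length,
          (low ≤ (a : Int) ∧ (a : Int) < (b : Int) ∧ (b : Int) ≤ h) →
          ((a : Int) ≤ (traceback[a]!)[b]! ∧ (traceback[a]!)[b]! < (b : Int)))) :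
    parentStrGo traceback low h ((h - low).toNat + 1) =
      (parentStrRun traceback [PvTask.interval low h] [] (3 ^ ((h - low).toNat + 1))).getD "" := by
  rcases hpre with heq | ⟨h0, hlt, hn, hsq, hval⟩
  · subst heq
    simp [parentStrGo, parentStrRun, pow_succ]
  · have hv : PvValid traceback low h := pre_valid traceback low h h0 hn hsq hval
    have hbase : parentStrRun traceback [] [pvC traceback low h] 0 = some (pvC traceback low h) := by
      simp [parentStrRun]
    have hrun := parentStrRun_interval traceback ((h - low).toNat) low h (by omega) hv le_rfl
      [] [] 0 (pvC traceback low h) hbase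
    rw [Nat.zero_add] at hrun
    rw [hrun]
    rfl

-- ===== VERDICT (by name: the statement is the Claim_ definition above) =====
theorem parentStr_spec : Claim_equal_parentStr := by
  intro traceback low high _ hpre
  unfold Spec_parentStr parentStr parentStr_alt
  cases high with
  | none => exact pvMain traceback low _ hpre
  | some x => exact pvMain traceback low x hpre
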